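-- pv_equiv track=rewrite | github.com/D-speedster/Social-Downloder | emergency_youtube_test.py | extract_qualities
-- ===== SOURCE A (Python) =====
-- from typing import Dict, List, Tuple
--
-- def extract_qualities(formats: List[Dict]) -> List[str]:
--     """Extract available video qualities"""
--     qualities = set()
--     for fmt in formats:
--         height = fmt.get('height')
--         if height:
--             if height >= 1080:
--                 qualities.add('1080p')
--             elif height >= 720:
--                 qualities.add('720p')
--             elif height >= 480:
--                 qualities.add('480p')
--             elif height >= 360:
--                 qualities.add('360p')
--
--     return sorted(list(qualities), key=lambda x: int(x[:-1]), reverse=True)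
-- ===== SOURCE B (Python) =====
-- def extract_qualities(formats):
--     """Extract available video qualities"""
--     heights = [h for fmt in formats if (h := fmt.get('height'))]
--     bands = [(1080, None, '1080p'), (720, 1080, '720p'),
--              (480, 720, '480p'), (360, 480, '360p')]
--     return [label for (lo, hi, label) in bands
--             if any(lo <= h and (hi is None or h < hi) for h in heights)]
-- ===== Notes on version B (the rewrite author's own statement) =====
-- stated objective: alternative
-- what changed: Inverts the loop nesting: instead of classifying each format into a set and sorting the set by parsed label, B gathers the truthy heights once and iterates over a fixed descending band table, emitting a label when any height falls in its half-open range, so there is no set and no sort.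
import Mathlib
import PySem

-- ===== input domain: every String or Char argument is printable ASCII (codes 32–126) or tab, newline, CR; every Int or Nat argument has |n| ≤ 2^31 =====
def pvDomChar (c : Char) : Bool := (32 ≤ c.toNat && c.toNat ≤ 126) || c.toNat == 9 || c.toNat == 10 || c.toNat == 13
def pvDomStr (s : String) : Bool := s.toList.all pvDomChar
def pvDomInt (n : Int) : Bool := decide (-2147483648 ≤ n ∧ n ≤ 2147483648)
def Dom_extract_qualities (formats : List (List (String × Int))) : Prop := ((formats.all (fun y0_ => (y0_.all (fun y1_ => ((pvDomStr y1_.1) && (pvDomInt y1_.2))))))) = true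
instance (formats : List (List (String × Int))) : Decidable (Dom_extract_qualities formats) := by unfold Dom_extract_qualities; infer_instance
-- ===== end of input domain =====

-- B replaces A's per-format classification into a set plus a final sort by an
-- outer loop over a fixed descending band table with an inner 'any' over the
-- gathered truthy heights (no set, no sort); return values proved identical.

-- ===== PORT A =====
-- loop body of A's 'for fmt in formats'
def pvStepA (qualities : PySem.Set String) (fmt : List (String × Int)) : PySem.Set String :=
  match PySem.Dict.get? (PySem.Dict.mk fmt) "height" with
  | some height =>
      if height ≠ 0 then                                  -- 'if height:' (truthy int)
        if height ≥ 1080 then PySem.Set.add qualities "1080p"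
        else if height ≥ 720 then PySem.Set.add qualities "720p"
        else if height ≥ 480 then PySem.Set.add qualities "480p"
        else if height ≥ 360 then PySem.Set.add qualities "360p"
        else qualities
      else qualities
  | none => qualities                                     -- fmt.get('height') is None: falsy

def extract_qualities (formats : List (List (String × Int))) : List String :=
  let qualities := formats.foldl pvStepA PySem.Set.empty
  -- key = int(x[:-1]); every element is "1080p"/"720p"/"480p"/"360p", whose
  -- prefix always parses, so '.getD 0' never substitutes (exact here)
  PySem.List.sorted qualities
    (fun x => (PySem.Int.ofStr? (PySem.Str.slice x none (some (-1)))).getD 0) true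

-- ===== PORT B =====
-- the comprehension '[h for fmt in formats if (h := fmt.get('height'))]'
def pvHeightsB (formats : List (List (String × Int))) : List Int :=
  formats.filterMap (fun fmt =>
    match PySem.Dict.get? (PySem.Dict.mk fmt) "height" with
    | some h => if h ≠ 0 then some h else none
    | none => none)

def extract_qualities_alt (formats : List (List (String × Int))) : List String :=
  let heights := pvHeightsB formats
  let bands : List (Int × Option Int × String) :=
    [(1080, none, "1080p"), (720, some 1080, "720p"),
     (480, some 720, "480p"), (360, some 480, "360p")]
  bands.filterMap (fun b =>
    if heights.any (fun h => b.1 ≤ h &&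
        (match b.2.1 with | none => true | some hi => decide (h < hi)))
    then some b.2.2 else none)

-- ===== PRECONDITION & SPEC =====
def Spec_extract_qualities (formats : List (List (String × Int))) (out : List String) : Prop := out = extract_qualities_alt formats
instance (formats : List (List (String × Int))) (out : List String) : Decidable (Spec_extract_qualities formats out) := by unfold Spec_extract_qualities; infer_instance

-- ===== CLAIM (what is proved, stated in full; the proofs are below) =====
def Claim_equal_extract_qualities : Prop := ∀ (formats : List (List (String × Int))), Dom_extract_qualities formats → Spec_extract_qualities formats (extract_qualities formats)

-- ===== LEMMAS AND PROOFS =====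

-- the label A's elif chain assigns to a truthy height
def pvLabelOf (h : Int) : Option String :=
  if h ≥ 1080 then some "1080p"
  else if h ≥ 720 then some "720p"
  else if h ≥ 480 then some "480p"
  else if h ≥ 360 then some "360p"
  else none

theorem pvStepA_eq (s : PySem.Set String) (fmt : List (String × Int)) :
    pvStepA s fmt = match PySem.Dict.get? (PySem.Dict.mk fmt) "height" with
      | some h => if h ≠ 0 then (match pvLabelOf h with
          | some l => PySem.Set.add s l
          | none => s) else s
      | none => s := by
  unfold pvStepA pvLabelOf
  cases PySem.Dict.get? (PySem.Dict.mk fmt) "height" with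
  | none => rfl
  | some h => dsimp only; split_ifs <;> rfl

theorem mem_foldA (formats : List (List (String × Int))) (s : PySem.Set String) (l : String) :
    l ∈ formats.foldl pvStepA s ↔
      l ∈ s ∨ ∃ h ∈ pvHeightsB formats, pvLabelOf h = some l := by
  induction formats generalizing s with
  | nil => simp [pvHeightsB]
  | cons fmt rest ih =>
      rw [List.foldl_cons, ih]
      have hstep : l ∈ pvStepA s fmt ↔
          l ∈ s ∨ ∃ h, (match PySem.Dict.get? (PySem.Dict.mk fmt) "height" with
            | some h' => if h' ≠ 0 then some h' else none
            | none => none) = some h ∧ pvLabelOf h = some l := by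
        rw [pvStepA_eq]
        cases hg : PySem.Dict.get? (PySem.Dict.mk fmt) "height" with
        | none => simp
        | some h =>
            by_cases hz : h ≠ 0
            · simp only [if_pos hz]
              cases hl : pvLabelOf h with
              | none => simp [hz, hl]
              | some l' =>
                  rw [PySem.Set.mem_add]
                  constructor
                  · rintro (hm | rfl)
                    · exact Or.inl hm
                    · exact Or.inr ⟨h, by simp [hz, hl]⟩
                  · rintro (hm | ⟨h', hh', hl'⟩)
                    · exact Or.inl hm
                    · simp only [if_pos hz, Option.some.injEq] at hh'
                      subst hh'; rw [hl] at hl'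
                      exact Or.inr (Option.some.inj hl').symm
            · simp [if_neg hz, hz]
      rw [hstep]
      simp only [pvHeightsB, List.filterMap_cons]
      constructor
      · rintro (⟨hm | ⟨h, hh, hl⟩⟩ | ⟨h, hh, hl⟩)
        · exact Or.inl hm
        · refine Or.inr ⟨h, ?_, hl⟩
          cases hg : PySem.Dict.get? (PySem.Dict.mk fmt) "height" with
          | none => rw [hg] at hh; dsimp only at hh; exact absurd hh (by simp)
          | some h' =>
              rw [hg] at hh; dsimp only at hh
              by_cases hz : h' ≠ 0
              · rw [if_pos hz] at hh
                obtain rfl := Option.some.inj hh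
                simp [hg, hz]
              · rw [if_neg hz] at hh; exact absurd hh (by simp)
        · refine Or.inr ⟨h, ?_, hl⟩
          cases hg : PySem.Dict.get? (PySem.Dict.mk fmt) "height" <;> simp_all [pvHeightsB]
          · split <;> simp [hh]
      · rintro (hm | ⟨h, hh, hl⟩)
        · exact Or.inl (Or.inl hm)
        · cases hg : PySem.Dict.get? (PySem.Dict.mk fmt) "height" with
          | none =>
              rw [hg] at hh; dsimp only at hh
              exact Or.inr ⟨h, hh, hl⟩
          | some h' =>
              rw [hg] at hh; dsimp only at hh
              by_cases hz : h' ≠ 0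
              · rw [if_pos hz] at hh
                rcases List.mem_cons.mp hh with rfl | hh'
                · exact Or.inl (Or.inr ⟨h, by simp [hz], hl⟩)
                · exact Or.inr ⟨h, hh', hl⟩
              · rw [if_neg hz] at hh
                exact Or.inr ⟨h, hh, hl⟩

theorem nodup_foldA (formats : List (List (String × Int))) (s : PySem.Set String)
    (hs : s.Nodup) : (formats.foldl pvStepA s).Nodup := by
  induction formats generalizing s with
  | nil => exact hs
  | cons fmt rest ih =>
      rw [List.foldl_cons]
      refine ih _ ?_
      rw [pvStepA_eq]
      cases PySem.Dict.get? (PySem.Dict.mk fmt) "height" with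
      | none => exact hs
      | some h =>
          dsimp only
          by_cases hz : h ≠ 0
          · rw [if_pos hz]
            rcases hl : pvLabelOf h with _ | l <;> simp only [hl]
            · exact hs
            · exact PySem.Set.nodup_add _ _ hs
          · rw [if_neg hz]; exact hs

-- the four band conditions, as B tests them
theorem pvLabelOf_1080 (h : Int) : pvLabelOf h = some "1080p" ↔ 1080 ≤ h := by
  unfold pvLabelOf; split_ifs <;> simp_all <;> omega

theorem pvLabelOf_720 (h : Int) : pvLabelOf h = some "720p" ↔ (720 ≤ h ∧ h < 1080) := by
  unfold pvLabelOf; split_ifs <;> simp_all <;> omega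

theorem pvLabelOf_480 (h : Int) : pvLabelOf h = some "480p" ↔ (480 ≤ h ∧ h < 720) := by
  unfold pvLabelOf; split_ifs <;> simp_all <;> omega

theorem pvLabelOf_360 (h : Int) : pvLabelOf h = some "360p" ↔ (360 ≤ h ∧ h < 480) := by
  unfold pvLabelOf; split_ifs <;> simp_all <;> omega

theorem pvLabelOf_mem (h : Int) (l : String) (hl : pvLabelOf h = some l) :
    l = "1080p" ∨ l = "720p" ∨ l = "480p" ∨ l = "360p" := by
  unfold pvLabelOf at hl; split_ifs at hl <;> simp_all

-- ===== VERDICT (by name: the statement is the Claim_ definition above) =====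
theorem extract_qualities_spec : Claim_equal_extract_qualities := by
  intro formats _
  unfold Spec_extract_qualities extract_qualities extract_qualities_alt
  set hs := pvHeightsB formats with hhs
  set S := formats.foldl pvStepA PySem.Set.empty with hS
  -- the four presence conditions
  have c1 : (hs.any (fun h => decide (1080 ≤ h) && true) = true) ↔
      ∃ h ∈ hs, pvLabelOf h = some "1080p" := by
    simp [List.any_eq_true, pvLabelOf_1080]
  have c2 : (hs.any (fun h => decide (720 ≤ h) && decide (h < 1080)) = true) ↔
      ∃ h ∈ hs, pvLabelOf h = some "720p" := by
    simp [List.any_eq_true, pvLabelOf_720]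
  have c3 : (hs.any (fun h => decide (480 ≤ h) && decide (h < 720)) = true) ↔
      ∃ h ∈ hs, pvLabelOf h = some "480p" := by
    simp [List.any_eq_true, pvLabelOf_480]
  have c4 : (hs.any (fun h => decide (360 ≤ h) && decide (h < 480)) = true) ↔
      ∃ h ∈ hs, pvLabelOf h = some "360p" := by
    simp [List.any_eq_true, pvLabelOf_360]
  -- B's result, unfolded over the literal band table
  have hB : ([(1080, (none : Option Int), "1080p"), (720, some 1080, "720p"),
      (480, some 720, "480p"), (360, some 480, "360p")].filterMap (fun b =>
      if hs.any (fun h => b.1 ≤ h &&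
          (match b.2.1 with | none => true | some hi => decide (h < hi)))
      then some b.2.2 else none)) =
      ((if hs.any (fun h => decide (1080 ≤ h) && true) then ["1080p"] else []) ++
       (if hs.any (fun h => decide (720 ≤ h) && decide (h < 1080)) then ["720p"] else []) ++
       (if hs.any (fun h => decide (480 ≤ h) && decide (h < 720)) then ["480p"] else []) ++
       (if hs.any (fun h => decide (360 ≤ h) && decide (h < 480)) then ["360p"] else [])) := by
    simp only [List.filterMap_cons, List.filterMap_nil]
    split_ifs <;> simp_all
  rw [hB]
  set ys := ((if hs.any (fun h => decide (1080 ≤ h) && true) then ["1080p"] else []) ++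
       (if hs.any (fun h => decide (720 ≤ h) && decide (h < 1080)) then ["720p"] else []) ++
       (if hs.any (fun h => decide (480 ≤ h) && decide (h < 720)) then ["480p"] else []) ++
       (if hs.any (fun h => decide (360 ≤ h) && decide (h < 480)) then ["360p"] else [])) with hys
  -- ys is a permutation of the set S
  have hmemS : ∀ l, l ∈ S ↔ ∃ h ∈ hs, pvLabelOf h = some l := by
    intro l
    rw [hS, mem_foldA]
    simp only [PySem.Set.empty, List.not_mem_nil, false_or]
    rw [← hhs]
  have hmemys : ∀ l, l ∈ ys ↔ l ∈ S := by
    intro l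
    rw [hmemS, hys]
    simp only [List.mem_append]
    constructor
    · intro hm
      rcases hm with ((h1 | h2) | h3) | h4
      · rw [List.mem_ite_nil_right] at h1; exact (List.mem_singleton.mp h1.2) ▸ c1.mp h1.1
      · rw [List.mem_ite_nil_right] at h2; exact (List.mem_singleton.mp h2.2) ▸ c2.mp h2.1
      · rw [List.mem_ite_nil_right] at h3; exact (List.mem_singleton.mp h3.2) ▸ c3.mp h3.1
      · rw [List.mem_ite_nil_right] at h4; exact (List.mem_singleton.mp h4.2) ▸ c4.mp h4.1
    · rintro ⟨h, hh, hl⟩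
      rcases pvLabelOf_mem h l hl with rfl | rfl | rfl | rfl
      · exact Or.inl (Or.inl (Or.inl (by rw [List.mem_ite_nil_right]; exact ⟨c1.mpr ⟨h, hh, hl⟩, List.mem_singleton.mpr rfl⟩)))
      · exact Or.inl (Or.inl (Or.inr (by rw [List.mem_ite_nil_right]; exact ⟨c2.mpr ⟨h, hh, hl⟩, List.mem_singleton.mpr rfl⟩)))
      · exact Or.inl (Or.inr (by rw [List.mem_ite_nil_right]; exact ⟨c3.mpr ⟨h, hh, hl⟩, List.mem_singleton.mpr rfl⟩))
      · exact Or.inr (by rw [List.mem_ite_nil_right]; exact ⟨c4.mpr ⟨h, hh, hl⟩, List.mem_singleton.mpr rfl⟩)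
  have hnodupS : S.Nodup := nodup_foldA formats _ (by simp [PySem.Set.empty])
  have hnodupys : ys.Nodup := by
    rw [hys]; split_ifs <;> decide
  have hperm : ys.Perm S :=
    (List.perm_ext_iff_of_nodup hnodupys hnodupS).mpr hmemys
  have hpair : ys.Pairwise (fun a b =>
      ((PySem.Int.ofStr? (PySem.Str.slice b none (some (-1)))).getD 0 : Int) <
      (PySem.Int.ofStr? (PySem.Str.slice a none (some (-1)))).getD 0) := by
    rw [hys]; split_ifs <;> decide
  show PySem.List.sorted S (fun x => (PySem.Int.ofStr? (PySem.Str.slice x none (some (-1)))).getD 0) true = ys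
  exact (PySem.List.sorted_rev_eq_of_perm_of_pairwise_gt _ _ _ hperm hpair)
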